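-- pv_equiv track=rewrite | github.com/jonathantsang/CompetitiveProgramming | codeforces/c653/c/c.py | solve
-- ===== SOURCE A (Python) =====
-- def solve(N,S):
-- 	invalid = 0
-- 	bal = 0
-- 	for b in S:
-- 		if b == ')':
-- 			bal -= 1
-- 			if bal < 0:
-- 				bal = 0
-- 				invalid += 1
-- 		else:
-- 			bal += 1
-- 	# balance at end is something
--
-- 	return invalid
-- ===== SOURCE B (Python) =====
-- def solve(N, S):
--     bal = 0
--     lo = 0
--     for ch in S:
--         bal += -1 if ch == ')' else 1
--         if bal < lo:
--             lo = bal
--     return -lo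
-- ===== Notes on version B (the rewrite author's own statement) =====
-- stated objective: alternative
-- what changed: Replaces A's clamp-and-reset counter (reset balance to 0 and increment a counter on each underflow) with a pure signed running balance whose minimum prefix value is tracked; the answer is the negation of that minimum.
import Mathlib
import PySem

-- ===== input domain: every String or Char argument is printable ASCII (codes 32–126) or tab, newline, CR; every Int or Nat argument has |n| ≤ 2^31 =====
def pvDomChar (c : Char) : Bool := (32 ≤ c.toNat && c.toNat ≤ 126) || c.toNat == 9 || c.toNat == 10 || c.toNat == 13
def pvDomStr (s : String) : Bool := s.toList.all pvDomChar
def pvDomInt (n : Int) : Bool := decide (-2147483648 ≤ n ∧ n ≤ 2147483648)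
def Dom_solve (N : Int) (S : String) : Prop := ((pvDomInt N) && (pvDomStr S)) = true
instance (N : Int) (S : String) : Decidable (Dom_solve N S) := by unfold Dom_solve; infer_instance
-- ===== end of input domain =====

-- B replaces A's clamp-and-reset underflow counter with a signed running balance whose minimum prefix value is tracked; answer = -min (alternative decomposition, same cost).


-- ===== PORT A =====
-- state (invalid, bal); on ')' decrement bal, and if bal < 0 reset it to 0 and count
def solveStep (st : Int × Int) (b : Char) : Int × Int :=
  if b = ')' then
    let bal := st.2 - 1
    if bal < 0 then (st.1 + 1, 0) else (st.1, bal)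
  else (st.1, st.2 + 1)

def solve (N : Int) (S : String) : Int :=
  (S.toList.foldl solveStep (0, 0)).1

-- ===== PORT B =====
-- state (bal, lo); pure signed balance, lo = minimum prefix balance (seeded at 0)
def solveAltStep (st : Int × Int) (ch : Char) : Int × Int :=
  let bal := st.1 + (if ch = ')' then -1 else 1)
  (bal, if bal < st.2 then bal else st.2)

def solve_alt (N : Int) (S : String) : Int :=
  -(S.toList.foldl solveAltStep (0, 0)).2

-- ===== PRECONDITION & SPEC =====
def Spec_solve (N : Int) (S : String) (out : Int) : Prop := out = solve_alt N S
instance (N : Int) (S : String) (out : Int) : Decidable (Spec_solve N S out) := by unfold Spec_solve; infer_instance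

-- ===== CLAIM (what is proved, stated in full; the proofs are below) =====
def Claim_equal_solve : Prop := ∀ (N : Int) (S : String), Dom_solve N S → Spec_solve N S (solve N S)

-- ===== LEMMAS AND PROOFS =====

-- Invariant linking A's (invalid, bal) to B's (p, lo): bal = p - lo, invalid = -lo, lo ≤ 0, lo ≤ p.
theorem solve_fold_inv (l : List Char) (i b p lo : Int)
    (hb : b = p - lo) (hi : i = -lo) (h0 : lo ≤ 0) (hp : lo ≤ p) :
    (l.foldl solveStep (i, b)).1 = -(l.foldl solveAltStep (p, lo)).2 := by
  induction l generalizing i b p lo with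
  | nil => simpa using by omega
  | cons c t ih =>
    simp only [List.foldl_cons, solveStep, solveAltStep]
    by_cases hc : c = ')'
    · simp only [hc, if_true, reduceIte]
      by_cases hneg : b - 1 < 0
      · rw [if_pos hneg]
        have hlo : p + -1 < lo := by omega
        rw [if_pos hlo]
        exact ih _ _ _ _ (by omega) (by omega) (by omega) (by omega)
      · rw [if_neg hneg]
        have hlo : ¬ (p + -1 < lo) := by omega
        rw [if_neg hlo]
        exact ih _ _ _ _ (by omega) (by omega) (by omega) (by omega)
    · rw [if_neg hc, if_neg hc]
      have hlo : ¬ (p + 1 < lo) := by omega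
      rw [if_neg hlo]
      exact ih _ _ _ _ (by omega) (by omega) (by omega) (by omega)

-- ===== VERDICT (by name: the statement is the Claim_ definition above) =====
theorem solve_spec : Claim_equal_solve := by
  intro N S _
  unfold Spec_solve solve solve_alt
  exact solve_fold_inv S.toList 0 0 0 0 rfl rfl le_rfl le_rfl
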